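-- pv_equiv track=rewrite | github.com/ValentinMartine/table_tennis_predictions | chess_candidates_2026/chess_src/features/context.py | _color_streak
-- ===== SOURCE A (Python) =====
-- def _color_streak(history: list) -> int:
--     """Returns length of current color streak: positive = whites, negative = blacks."""
--     if not history:
--         return 0
--     last = history[-1]
--     streak = 0
--     for c in reversed(history):
--         if c == last:
--             streak += 1
--         else:
--             break
--     return streak if last == "W" else -streak
-- ===== SOURCE B (Python) =====
-- def _color_streak(history: list) -> int:
--     """Forward one-pass run tracking: keep the key and length of the current run."""
--     key, length = None, 0
--     for c in history:
--         if c == key: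
--             length += 1
--         else:
--             key, length = c, 1
--     if length == 0:
--         return 0
--     return length if key == "W" else -length
-- ===== Notes on version B (the rewrite author's own statement) =====
-- stated objective: alternative
-- what changed: B replaces A's backward scan with break (reversed(history), count while equal to history[-1]) by a single forward pass that maintains the key and length of the current run and signs the final run.
import Mathlib
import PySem

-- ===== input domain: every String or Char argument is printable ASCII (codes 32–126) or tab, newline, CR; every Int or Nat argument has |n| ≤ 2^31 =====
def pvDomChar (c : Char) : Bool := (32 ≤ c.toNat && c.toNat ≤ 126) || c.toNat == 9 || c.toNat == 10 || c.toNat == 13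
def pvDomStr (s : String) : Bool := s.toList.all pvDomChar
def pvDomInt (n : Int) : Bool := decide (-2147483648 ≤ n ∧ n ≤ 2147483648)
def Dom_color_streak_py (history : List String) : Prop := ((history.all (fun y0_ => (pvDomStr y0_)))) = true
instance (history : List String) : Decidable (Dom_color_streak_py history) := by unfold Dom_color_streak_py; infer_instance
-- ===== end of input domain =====

-- B replaces A's backward scan-with-break by a single forward pass tracking the current run; same O(n) cost.

-- ===== PORT A =====
-- A's loop 'for c in reversed(history): if c == last: streak += 1 else: break'
def streakLoopA (last : String) : List String → Int
  | [] => 0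
  | c :: cs => if c = last then streakLoopA last cs + 1 else 0

def color_streak_py (history : List String) : Int :=
  if history = [] then 0
  else
    match PySem.List.pyGet? history (-1) with
    | none => 0          -- unreachable: history ≠ []
    | some last =>
      let streak := streakLoopA last history.reverse
      if last = "W" then streak else -streak

-- ===== PORT B =====
-- forward pass: state = (key of current run, its length)
def stepB (st : Option String × Int) (c : String) : Option String × Int :=
  if some c = st.1 then (st.1, st.2 + 1) else (some c, 1)

def color_streak_py_alt (history : List String) : Int :=
  let st := history.foldl stepB (none, 0)
  if st.2 = 0 then 0
  else
    match st.1 with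
    | some k => if k = "W" then st.2 else -st.2
    | none => 0          -- unreachable: length ≠ 0 implies a key exists

-- ===== PRECONDITION & SPEC =====
def Spec_color_streak_py (history : List String) (out : Int) : Prop := out = color_streak_py_alt history
instance (history : List String) (out : Int) : Decidable (Spec_color_streak_py history out) := by unfold Spec_color_streak_py; infer_instance

-- ===== CLAIM (what is proved, stated in full; the proofs are below) =====
def Claim_equal_color_streak_py : Prop := ∀ (history : List String), Dom_color_streak_py history → Spec_color_streak_py history (color_streak_py history)

-- ===== LEMMAS AND PROOFS =====

lemma streakLoopA_pos (last : String) (t : List String) :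
    0 < streakLoopA last (last :: t) := by
  simp [streakLoopA]
  have : 0 ≤ streakLoopA last t := by
    induction t with
    | nil => simp [streakLoopA]
    | cons c cs ih => by_cases h : c = last <;> simp [streakLoopA, h] <;> omega
  omega

/-- the fold of B, characterised by the reverse of its input -/
lemma foldB_char (l : List String) :
    l.foldl stepB (none, 0) =
      match l.reverse with
      | [] => (none, 0)
      | last :: _ => (some last, streakLoopA last l.reverse) := by
  induction l using List.reverseRecOn with
  | nil => simp
  | append_singleton l c ih =>
    rw [List.foldl_append, ih]
    cases hr : l.reverse with
    | nil =>
      have : l = [] := by simpa using congrArg List.reverse hr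
      simp [this, stepB, streakLoopA]
    | cons last t =>
      simp only [List.reverse_append, List.reverse_cons, List.reverse_nil,
        List.nil_append, List.cons_append, hr, List.foldl]
      by_cases h : c = last
      · subst h
        simp [stepB, streakLoopA]
      · simp [stepB, h, streakLoopA, Ne.symm h]

theorem color_streak_py_eq_alt (history : List String) :
    color_streak_py history = color_streak_py_alt history := by
  unfold color_streak_py color_streak_py_alt
  by_cases h : history = []
  · simp [h]
  · rw [if_neg h, PySem.List.pyGet?_neg_one]
    rw [foldB_char]
    cases hr : history.reverse with
    | nil => exact absurd (by simpa using congrArg List.reverse hr) h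
    | cons last t =>
      have hlast : history.getLast? = some last := by
        rw [← List.head?_reverse, hr]; rfl
      have hpos := streakLoopA_pos last t
      have hne : streakLoopA last (last :: t) ≠ 0 := by omega
      rw [hlast]
      simp [hne]

-- ===== VERDICT (by name: the statement is the Claim_ definition above) =====
theorem color_streak_py_spec : Claim_equal_color_streak_py := by
  intro history _
  exact color_streak_py_eq_alt history
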